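-- pv_equiv track=rewrite | github.com/daksh-devrani/SBOM-optimization-pipeline | research-validation-pipeline/research/static_analysis/signals.py | detect_call_path
-- ===== SOURCE A (Python) =====
-- def detect_call_path(target_functions: list[str], call_graph: dict[str, list[str]]) -> bool:
--     from collections import deque
--
--     visited = set()
--     queue = deque(call_graph.keys())
--
--     while queue:
--         current = queue.popleft()
--         if current in target_functions:
--             return True
--         visited.add(current)
--         for neighbor in call_graph.get(current, []):
--             if neighbor not in visited:
--                 queue.append(neighbor)
--
--     return False
-- ===== SOURCE B (Python) =====
-- def detect_call_path(target_functions: list[str], call_graph: dict[str, list[str]]) -> bool: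
--     # Every key is enqueued up front, so A's BFS examines exactly the keys and all
--     # listed neighbors; the answer is just whether any of those nodes is a target.
--     targets = set(target_functions)
--     if any(k in targets for k in call_graph):
--         return True
--     return any(n in targets for ns in call_graph.values() for n in ns)
-- ===== Notes on version B (the rewrite author's own statement) =====
-- stated objective: simpler
-- what changed: Replaced the queue/visited BFS traversal with two direct membership scans: since every key is enqueued initially, A's traversal examines exactly the keys plus all listed neighbors, so B just checks whether any key or any neighbor is a target function.
import Mathlib
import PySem

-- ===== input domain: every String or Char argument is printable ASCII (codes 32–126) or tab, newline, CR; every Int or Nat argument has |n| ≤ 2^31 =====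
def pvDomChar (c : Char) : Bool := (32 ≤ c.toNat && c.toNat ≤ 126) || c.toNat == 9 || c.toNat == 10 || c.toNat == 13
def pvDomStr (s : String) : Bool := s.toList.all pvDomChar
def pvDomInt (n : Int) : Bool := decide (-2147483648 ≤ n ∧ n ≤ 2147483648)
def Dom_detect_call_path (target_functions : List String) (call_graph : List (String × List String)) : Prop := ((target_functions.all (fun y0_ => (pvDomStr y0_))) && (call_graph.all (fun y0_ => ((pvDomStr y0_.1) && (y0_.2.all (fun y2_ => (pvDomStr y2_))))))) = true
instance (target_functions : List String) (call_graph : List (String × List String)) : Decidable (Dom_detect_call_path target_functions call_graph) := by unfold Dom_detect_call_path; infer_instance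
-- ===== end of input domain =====

-- B replaces A's queue/visited BFS by two direct membership scans over the keys and the
-- adjacency lists (return value only; neither version mutates its arguments).
-- ===== PORT A =====
-- All nodes that can ever appear in the BFS queue: the dict's keys and every listed neighbor.
def nodeUniv (cg : List (String × List String)) : List String :=
  cg.map Prod.fst ++ (cg.map Prod.snd).flatten

-- first component of the loop's termination measure: nodes of the universe not yet visited
def unvis (cg : List (String × List String)) (q v : List String) : Nat :=
  ((nodeUniv cg ++ q).toFinset.filter (fun x => x ∉ v)).card

lemma mem_nodeUniv_of_getD {cg : List (String × List String)} {c x : String}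
    (h : x ∈ (PySem.Dict.mk cg).getD c []) : x ∈ nodeUniv cg := by
  rcases hf : List.find? (fun p => p.1 == c) cg with _ | p
  · simp [PySem.Dict.getD, PySem.Dict.get?, hf] at h
  · have hp : p ∈ cg := List.mem_of_find?_eq_some hf
    have hx : x ∈ p.2 := by simpa [PySem.Dict.getD, PySem.Dict.get?, hf] using h
    simp only [nodeUniv, List.mem_append, List.mem_flatten]
    exact Or.inr ⟨p.2, List.mem_map.2 ⟨p, hp, rfl⟩, hx⟩

lemma add_eq_of_mem {v : PySem.Set String} {c : String} (h : c ∈ v) :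
    PySem.Set.add v c = v := by
  simp [PySem.Set.add, PySem.Set.contains, h]

lemma unvis_lt {cg : List (String × List String)} {current : String} {rest : List String}
    {v : PySem.Set String} (hcur : current ∉ v) (ns : List String)
    (hns : ∀ x ∈ ns, x ∈ nodeUniv cg) :
    unvis cg (rest ++ ns) (PySem.Set.add v current) < unvis cg (current :: rest) v := by
  apply Finset.card_lt_card
  have hsub : ((nodeUniv cg ++ (rest ++ ns)).toFinset.filter (fun x => x ∉ PySem.Set.add v current))
      ⊆ ((nodeUniv cg ++ (current :: rest)).toFinset.filter (fun x => x ∉ v)) := by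
    intro x hx
    simp only [Finset.mem_filter, List.mem_toFinset, List.mem_append, List.mem_cons] at hx ⊢
    rcases hx with ⟨hmem, hnv⟩
    rw [PySem.Set.mem_add, not_or] at hnv
    refine ⟨?_, hnv.1⟩
    rcases hmem with h | h | h
    · exact Or.inl h
    · exact Or.inr (Or.inr h)
    · exact Or.inl (hns x h)
  rw [Finset.ssubset_iff_of_subset hsub]
  refine ⟨current, ?_, ?_⟩
  · simp [Finset.mem_filter, List.mem_toFinset, hcur]
  · simp only [Finset.mem_filter, List.mem_toFinset, not_and, not_not]
    intro _
    exact (PySem.Set.mem_add v current current).2 (Or.inr rfl)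

lemma unvis_le {cg : List (String × List String)} {current : String} {rest : List String}
    {v : PySem.Set String} (ns : List String) (hns : ∀ x ∈ ns, x ∈ nodeUniv cg) :
    unvis cg (rest ++ ns) v ≤ unvis cg (current :: rest) v := by
  apply Finset.card_le_card
  intro x hx
  simp only [Finset.mem_filter, List.mem_toFinset, List.mem_append, List.mem_cons] at hx ⊢
  rcases hx with ⟨hmem, hnv⟩
  refine ⟨?_, hnv⟩
  rcases hmem with h | h | h
  · exact Or.inl h
  · exact Or.inr (Or.inr h)
  · exact Or.inl (hns x h)

-- the BFS loop of A ('while queue: …'), recursion on a lexicographic measure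
def detectLoop (call_graph : List (String × List String)) (target_functions : List String)
    (queue : List String) (visited : PySem.Set String) : Bool :=
  match queue with
  | [] => false
  | current :: rest =>
    if target_functions.contains current then true
    else
      let visited' := PySem.Set.add visited current
      let neighbors := (PySem.Dict.mk call_graph).getD current []
      detectLoop call_graph target_functions
        (rest ++ neighbors.filter (fun n => !(visited'.contains n))) visited'
termination_by (unvis call_graph queue visited, (queue.filter (fun x => visited.contains x)).length)
decreasing_by
  by_cases hc : current ∈ visited
  · apply Prod.Lex.right'
    · rw [add_eq_of_mem hc]
      exact unvis_le _ (fun x hx => mem_nodeUniv_of_getD (List.mem_of_mem_filter hx))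
    · rw [add_eq_of_mem hc]
      have hzero : (List.filter (fun x => visited.contains x)
          (List.filter (fun n => !visited.contains n) ((PySem.Dict.mk call_graph).getD current []))) = [] := by
        rw [List.filter_eq_nil_iff]
        intro a ha
        have := List.of_mem_filter ha
        simp_all
      have hcb : visited.contains current = true := by
        simpa [PySem.Set.contains, List.contains_iff_mem] using hc
      rw [List.filter_append, hzero, List.append_nil, List.filter_cons_of_pos hcb,
        List.length_cons]
      exact Nat.lt_succ_self _
  · apply Prod.Lex.left
    exact unvis_lt hc _ (fun x hx => mem_nodeUniv_of_getD (List.mem_of_mem_filter hx))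

def detect_call_path (target_functions : List String) (call_graph : List (String × List String)) : Bool :=
  detectLoop call_graph target_functions (PySem.Dict.mk call_graph).keys PySem.Set.empty

-- ===== PORT B =====
def detect_call_path_alt (target_functions : List String) (call_graph : List (String × List String)) : Bool :=
  let targets := PySem.Set.ofList target_functions
  if call_graph.any (fun kv => targets.contains kv.1) then true
  else call_graph.any (fun kv => kv.2.any (fun n => targets.contains n))

-- ===== PRECONDITION & SPEC =====
-- Pre_ only requires the association list to be a well-formed dict encoding (distinct keys),
-- which every Python dict argument satisfies; it excludes no actual Python input of A.
def Pre_detect_call_path (target_functions : List String) (call_graph : List (String × List String)) : Prop :=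
  (call_graph.map Prod.fst).Nodup
instance (target_functions : List String) (call_graph : List (String × List String)) : Decidable (Pre_detect_call_path target_functions call_graph) := by unfold Pre_detect_call_path; infer_instance

def pvWitness_detect_call_path : List String × (List (String × List String)) :=
  (["b"], [("a", ["b", "c"]), ("c", [])])

def Spec_detect_call_path (target_functions : List String) (call_graph : List (String × List String)) (out : Bool) : Prop := out = detect_call_path_alt target_functions call_graph
instance (target_functions : List String) (call_graph : List (String × List String)) (out : Bool) : Decidable (Spec_detect_call_path target_functions call_graph out) := by unfold Spec_detect_call_path; infer_instance

-- ===== CLAIM (what is proved, stated in full; the proofs are below) =====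
def Claim_equal_detect_call_path : Prop := ∀ (target_functions : List String) (call_graph : List (String × List String)), Dom_detect_call_path target_functions call_graph → Pre_detect_call_path target_functions call_graph → Spec_detect_call_path target_functions call_graph (detect_call_path target_functions call_graph)

-- ===== LEMMAS AND PROOFS =====

lemma loop_sound {cg : List (String × List String)} {tf : List String} :
    ∀ q v, (∀ x ∈ q, x ∈ nodeUniv cg) → detectLoop cg tf q v = true →
      ∃ x ∈ nodeUniv cg, x ∈ tf := by
  intro q v
  induction q, v using detectLoop.induct cg tf with
  | case1 =>
    intro _ h
    simp [detectLoop] at h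
  | case2 v current rest hcont =>
    intro hq _
    exact ⟨current, hq current (by simp), by simpa [List.contains_iff_mem] using hcont⟩
  | case3 v current rest hcont _ _ ih =>
    intro hq hres
    simp only [detectLoop] at hres
    rw [if_neg hcont] at hres
    apply ih _ hres
    intro x hx
    rcases List.mem_append.1 hx with h | h
    · exact hq x (by simp [h])
    · exact mem_nodeUniv_of_getD (List.mem_of_mem_filter h)

lemma loop_complete {cg : List (String × List String)} {tf : List String} :
    ∀ q v, (∀ y ∈ v, y ∉ tf) →
      ∀ x, x ∈ tf →
        (x ∈ q ∨ ∃ k ∈ q, x ∈ (PySem.Dict.mk cg).getD k []) →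
        detectLoop cg tf q v = true := by
  intro q v
  induction q, v using detectLoop.induct cg tf with
  | case1 =>
    intro _ x _ hpos
    rcases hpos with h | ⟨k, hk, _⟩
    · simp at h
    · simp at hk
  | case2 v current rest hcont =>
    intro _ _ _ _
    simp only [detectLoop]
    rw [if_pos hcont]
  | case3 v current rest hcont _ _ ih =>
    intro hdisj x hx hpos
    have hcur_ntf : current ∉ tf := by simpa [List.contains_iff_mem] using hcont
    have hdisj' : ∀ y ∈ PySem.Set.add v current, y ∉ tf := by
      intro y hy
      rcases (PySem.Set.mem_add v current y).1 hy with h | h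
      · exact hdisj y h
      · exact h ▸ hcur_ntf
    simp only [detectLoop]
    rw [if_neg hcont]
    apply ih hdisj' x hx
    have hxnv' : x ∉ PySem.Set.add v current := by
      intro h
      rcases (PySem.Set.mem_add v current x).1 h with h | h
      · exact hdisj x h hx
      · exact hcur_ntf (h ▸ hx)
    rcases hpos with h | ⟨k, hk, hxk⟩
    · rcases List.mem_cons.1 h with h | h
      · exact absurd (h ▸ hx) hcur_ntf
      · exact Or.inl (List.mem_append.2 (Or.inl h))
    · rcases List.mem_cons.1 hk with h | h
      · refine Or.inl (List.mem_append.2 (Or.inr ?_))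
        refine List.mem_filter.2 ⟨show x ∈ (PySem.Dict.mk cg).getD current [] from h ▸ hxk, ?_⟩
        show (!(PySem.Set.add v current).contains x) = true
        have hxc : (PySem.Set.add v current).contains x = false := by
          rw [← Bool.not_eq_true]
          simpa [PySem.Set.contains, List.contains_iff_mem] using hxnv'
        rw [hxc]
        rfl
      · exact Or.inr ⟨k, List.mem_append.2 (Or.inl h), hxk⟩

lemma keys_mk (cg : List (String × List String)) :
    (PySem.Dict.mk cg).keys = cg.map Prod.fst := rfl

lemma A_iff {tf : List String} {cg : List (String × List String)}
    (hpre : (cg.map Prod.fst).Nodup) :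
    detect_call_path tf cg = true ↔ ∃ x ∈ nodeUniv cg, x ∈ tf := by
  constructor
  · intro h
    apply loop_sound _ _ _ h
    intro x hx
    rw [keys_mk] at hx
    exact List.mem_append.2 (Or.inl hx)
  · rintro ⟨x, hxu, hxtf⟩
    apply loop_complete _ _ (by simp [PySem.Set.empty]) x hxtf
    rw [keys_mk]
    rcases List.mem_append.1 hxu with h | h
    · exact Or.inl h
    · rcases List.mem_flatten.1 h with ⟨l, hl, hxl⟩
      rcases List.mem_map.1 hl with ⟨p, hp, rfl⟩
      refine Or.inr ⟨p.1, List.mem_map.2 ⟨p, hp, rfl⟩, ?_⟩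
      rw [PySem.Dict.getD_of_mem_items (PySem.Dict.mk cg) (k := p.1) (v := p.2) hp hpre]
      exact hxl
  
lemma B_iff {tf : List String} {cg : List (String × List String)} :
    detect_call_path_alt tf cg = true ↔ ∃ x ∈ nodeUniv cg, x ∈ tf := by
  have hmem : ∀ n : String, (PySem.Set.ofList tf).contains n = true ↔ n ∈ tf := by
    intro n
    simp [PySem.Set.contains, PySem.Set.mem_ofList]
  simp only [detect_call_path_alt]
  by_cases h1 : cg.any (fun kv => (PySem.Set.ofList tf).contains kv.1) = true
  · simp only [if_pos h1, true_iff]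
    rcases List.any_eq_true.1 h1 with ⟨kv, hkv, hc⟩
    exact ⟨kv.1, List.mem_append.2 (Or.inl (List.mem_map.2 ⟨kv, hkv, rfl⟩)), (hmem _).1 hc⟩
  · simp only [if_neg h1]
    constructor
    · intro h
      rcases List.any_eq_true.1 h with ⟨kv, hkv, hc⟩
      rcases List.any_eq_true.1 hc with ⟨n, hn, hnc⟩
      exact ⟨n, List.mem_append.2 (Or.inr (List.mem_flatten.2 ⟨kv.2, List.mem_map.2 ⟨kv, hkv, rfl⟩, hn⟩)), (hmem _).1 hnc⟩
    · rintro ⟨x, hxu, hxtf⟩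
      rcases List.mem_append.1 hxu with h | h
      · rcases List.mem_map.1 h with ⟨p, hp, rfl⟩
        exact absurd (List.any_eq_true.2 ⟨p, hp, (hmem _).2 hxtf⟩) h1
      · rcases List.mem_flatten.1 h with ⟨l, hl, hxl⟩
        rcases List.mem_map.1 hl with ⟨p, hp, rfl⟩
        exact List.any_eq_true.2 ⟨p, hp, List.any_eq_true.2 ⟨x, hxl, (hmem _).2 hxtf⟩⟩

-- ===== VERDICT (by name: the statement is the Claim_ definition above) =====
theorem detect_call_path_spec : Claim_equal_detect_call_path := by
  intro tf cg _ hpre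
  unfold Spec_detect_call_path
  have hA := A_iff (tf := tf) hpre
  have hB := B_iff (tf := tf) (cg := cg)
  cases hres : detect_call_path tf cg
  · cases hres2 : detect_call_path_alt tf cg
    · rfl
    · exact absurd (hres ▸ hA.2 (hB.1 hres2)) (by simp)
  · exact (hB.2 (hA.1 hres)).symm
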